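-- pv_equiv track=rewrite | github.com/d3-ai/face-verification-demo | src/dataset_app/celeba_json.py | get_celebrities_and_images
-- ===== SOURCE A (Python) =====
-- from typing import Dict, List, Tuple
--
-- def get_celebrities_and_images(identities: List[str]) -> Dict[str, List[str]]:
--     """
--     good_celebs: Dict[str, List[str]]
--         key: celeb_id, value: image list
--         good_celebs['2880'] = ['000001.jpg', ...]
--         Each celeb contains at least 5 images.
--     """
--     all_celebs: Dict[str, List[str]] = {}
--
--     for line in identities:
--         info: List[str] = line.split()
--         if len(info) < 2:
--             continue
--         image, celeb = info[0], info[1] # info[0]: '000001.jpg' info[1]: '2880'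
--         if celeb not in all_celebs:
--             all_celebs[celeb] = []
--         all_celebs[celeb].append(image)
--
--     good_celebs: Dict[str, List[str]] = {c: all_celebs[c] for c in all_celebs if len(all_celebs[c]) == 30}
--     poor_celebs: Dict[str, List[str]] = {c: all_celebs[c] for c in all_celebs if len(all_celebs[c]) == 5}
--     return good_celebs, poor_celebs
-- ===== SOURCE B (Python) =====
-- from typing import Dict, List, Tuple
--
-- def get_celebrities_and_images(identities: List[str]):
--     # Pass 1: parse lines into (image, celeb) pairs and count images per celeb.
--     pairs = []
--     counts: Dict[str, int] = {}
--     for line in identities: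
--         info = line.split()
--         if len(info) < 2:
--             continue
--         image, celeb = info[0], info[1]
--         pairs.append((image, celeb))
--         counts[celeb] = counts.get(celeb, 0) + 1
--     # Pass 2: route each image straight into good (30 images) or poor (5 images),
--     # never materialising image lists for celebs that qualify for neither.
--     good: Dict[str, List[str]] = {}
--     poor: Dict[str, List[str]] = {}
--     for image, celeb in pairs:
--         n = counts[celeb]
--         if n == 30:
--             if celeb not in good:
--                 good[celeb] = []
--             good[celeb].append(image)
--         elif n == 5:
--             if celeb not in poor:
--                 poor[celeb] = []
--             poor[celeb].append(image)
--     return good, poor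
-- ===== Notes on version B (the rewrite author's own statement) =====
-- stated objective: alternative
-- what changed: Instead of grouping all images per celeb into a dict of lists and then filtering the finished groups by size, B first counts images per celeb in one pass and then routes each image directly into the good (count 30) or poor (count 5) dict, never building lists for celebs that qualify for neither.
import Mathlib
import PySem

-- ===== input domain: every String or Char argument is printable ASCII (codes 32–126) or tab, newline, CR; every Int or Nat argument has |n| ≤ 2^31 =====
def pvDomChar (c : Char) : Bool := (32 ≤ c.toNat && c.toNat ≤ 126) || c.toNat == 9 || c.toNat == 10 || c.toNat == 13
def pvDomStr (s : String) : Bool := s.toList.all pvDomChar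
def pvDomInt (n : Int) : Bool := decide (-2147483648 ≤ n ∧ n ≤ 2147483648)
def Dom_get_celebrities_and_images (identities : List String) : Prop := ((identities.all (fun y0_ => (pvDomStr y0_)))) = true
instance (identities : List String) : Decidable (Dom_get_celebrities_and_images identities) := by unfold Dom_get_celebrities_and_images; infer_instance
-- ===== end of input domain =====

-- B replaces A's group-everything-then-filter with a count-first pass that routes each
-- image directly into the good (30) or poor (5) dict; same cost, different decomposition.

-- ===== PORT A =====
-- one loop iteration of A: parse the line, skip short lines, setdefault-and-append
def pvStepA (d : PySem.Dict String (List String)) (line : String) : PySem.Dict String (List String) :=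
  let info := PySem.Str.split₀ line
  if info.length < 2 then d
  else
    match info with
    | image :: celeb :: _ =>
      let d := if d.contains celeb then d else d.insert celeb ([] : List String)
      d.modify celeb [] (fun imgs => imgs ++ [image])   -- all_celebs[celeb].append(image); key present
    | _ => d

def get_celebrities_and_images (identities : List String) : (List (String × List String)) × (List (String × List String)) :=
  let all_celebs := identities.foldl pvStepA PySem.Dict.empty
  -- the dict comprehensions: iterate keys in order, keep those whose list has the wanted length
  let good := (all_celebs.keys.filter (fun c => (all_celebs.getD c []).length == 30)).map (fun c => (c, all_celebs.getD c []))
  let poor := (all_celebs.keys.filter (fun c => (all_celebs.getD c []).length == 5)).map (fun c => (c, all_celebs.getD c []))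
  (good, poor)

-- ===== PORT B =====
-- pass 1 of B: collect (image, celeb) pairs and count images per celeb
def pvStepB1 (s : List (String × String) × PySem.Dict String Int) (line : String) :
    List (String × String) × PySem.Dict String Int :=
  let info := PySem.Str.split₀ line
  if info.length < 2 then s
  else
    match info with
    | image :: celeb :: _ => (s.1 ++ [(image, celeb)], s.2.insert celeb (s.2.getD celeb 0 + 1))
    | _ => s

-- pass 2 of B: route each image by its celeb's total count (counts[celeb] always present)
def pvStepB2 (counts : PySem.Dict String Int)
    (s : PySem.Dict String (List String) × PySem.Dict String (List String)) (p : String × String) :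
    PySem.Dict String (List String) × PySem.Dict String (List String) :=
  let n := counts.getD p.2 0
  if n == 30 then
    let g := if s.1.contains p.2 then s.1 else s.1.insert p.2 ([] : List String)
    (g.modify p.2 [] (fun imgs => imgs ++ [p.1]), s.2)
  else if n == 5 then
    let q := if s.2.contains p.2 then s.2 else s.2.insert p.2 ([] : List String)
    (s.1, q.modify p.2 [] (fun imgs => imgs ++ [p.1]))
  else s

def get_celebrities_and_images_alt (identities : List String) : (List (String × List String)) × (List (String × List String)) :=
  let pc := identities.foldl pvStepB1 ([], PySem.Dict.empty)
  let gp := pc.1.foldl (pvStepB2 pc.2) (PySem.Dict.empty, PySem.Dict.empty)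
  (gp.1.items, gp.2.items)

-- ===== PRECONDITION & SPEC =====
def Spec_get_celebrities_and_images (identities : List String) (out : (List (String × List String)) × (List (String × List String))) : Prop := out = get_celebrities_and_images_alt identities
instance (identities : List String) (out : (List (String × List String)) × (List (String × List String))) : Decidable (Spec_get_celebrities_and_images identities out) := by unfold Spec_get_celebrities_and_images; infer_instance

-- ===== CLAIM (what is proved, stated in full; the proofs are below) =====
def Claim_equal_get_celebrities_and_images : Prop := ∀ (identities : List String), Dom_get_celebrities_and_images identities → Spec_get_celebrities_and_images identities (get_celebrities_and_images identities)

-- ===== LEMMAS AND PROOFS =====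

-- the parsed (image, celeb) of a line, if it has ≥ 2 tokens
def pvParse (line : String) : Option (String × String) :=
  match PySem.Str.split₀ line with
  | image :: celeb :: _ => some (image, celeb)
  | _ => none

def pvPairs (identities : List String) : List (String × String) := identities.filterMap pvParse

-- setdefault-then-append is a single modify
theorem pv_sdmod (d : PySem.Dict String (List String)) (k : String) (f : List String → List String) :
    (if d.contains k then d else d.insert k ([] : List String)).modify k [] f = d.modify k [] f := by
  by_cases h : d.contains k = true
  · simp [h]
  · simp only [Bool.not_eq_true] at h
    have hd : d.getD k [] = [] := PySem.Dict.getD_of_not_contains d [] h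
    simp [h, PySem.Dict.modify, PySem.Dict.getD_insert_self, PySem.Dict.insert_insert_self, hd]

-- A's loop over lines is the modify-fold over the parsed pairs
theorem pv_foldA (identities : List String) (d : PySem.Dict String (List String)) :
    identities.foldl pvStepA d =
      (pvPairs identities).foldl (fun d p => d.modify p.2 [] (fun imgs => imgs ++ [p.1])) d := by
  induction identities generalizing d with
  | nil => rfl
  | cons line rest ih =>
    simp only [List.foldl_cons, pvPairs, List.filterMap_cons]
    have hstep : pvStepA d line =
        match pvParse line with
        | some p => d.modify p.2 [] (fun imgs => imgs ++ [p.1])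
        | none => d := by
      unfold pvStepA pvParse
      cases h : PySem.Str.split₀ line with
      | nil => simp
      | cons a t =>
        cases t with
        | nil => simp
        | cons b t' => simpa using pv_sdmod d b (fun imgs => imgs ++ [a])
    rw [hstep]
    cases h : pvParse line with
    | none => simp [ih, pvPairs]
    | some p => simp [ih, pvPairs]

-- B's first loop: pairs accumulate, counts is the insert-count fold over the celebs
theorem pv_foldB1 (identities : List String) (ps : List (String × String)) (cd : PySem.Dict String Int) :
    identities.foldl pvStepB1 (ps, cd) =
      (ps ++ pvPairs identities,
       ((pvPairs identities).map (fun p => p.2)).foldl (fun d c => d.insert c (d.getD c 0 + 1)) cd) := by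
  induction identities generalizing ps cd with
  | nil => simp [pvPairs]
  | cons line rest ih =>
    simp only [List.foldl_cons, pvPairs, List.filterMap_cons]
    have hstep : pvStepB1 (ps, cd) line =
        match pvParse line with
        | some p => (ps ++ [p], cd.insert p.2 (cd.getD p.2 0 + 1))
        | none => (ps, cd) := by
      unfold pvStepB1 pvParse
      cases h : PySem.Str.split₀ line with
      | nil => simp
      | cons a t => cases t with
        | nil => simp
        | cons b t' => simp
    rw [hstep]
    cases h : pvParse line with
    | none => simpa [pvPairs] using ih ps cd
    | some p => simpa [pvPairs] using ih (ps ++ [p]) (cd.insert p.2 (cd.getD p.2 0 + 1))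

-- B's second loop splits into independent folds over the 30-filtered and 5-filtered pairs
theorem pv_foldB2 (counts : PySem.Dict String Int) (l : List (String × String))
    (g q : PySem.Dict String (List String)) :
    l.foldl (pvStepB2 counts) (g, q) =
      ((l.filter (fun p => counts.getD p.2 0 == 30)).foldl
          (fun d p => d.modify p.2 [] (fun imgs => imgs ++ [p.1])) g,
       (l.filter (fun p => counts.getD p.2 0 == 5)).foldl
          (fun d p => d.modify p.2 [] (fun imgs => imgs ++ [p.1])) q) := by
  induction l generalizing g q with
  | nil => simp
  | cons p rest ih =>
    simp only [List.foldl_cons, List.filter_cons]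
    have hstep : pvStepB2 counts (g, q) p =
        (if counts.getD p.2 0 == 30 then g.modify p.2 [] (fun imgs => imgs ++ [p.1]) else g,
         if counts.getD p.2 0 == 5 then q.modify p.2 [] (fun imgs => imgs ++ [p.1]) else q) := by
      unfold pvStepB2
      by_cases h30 : counts.getD p.2 0 = 30
      · simp [h30, pv_sdmod]
      · by_cases h5 : counts.getD p.2 0 = 5
        · simp [h5, pv_sdmod]
        · simp [h30, h5]
    rw [hstep]
    by_cases h30 : counts.getD p.2 0 = 30
    · have h5 : ¬ counts.getD p.2 0 = 5 := by rw [h30]; decide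
      simp [h30, ih]
    · by_cases h5 : counts.getD p.2 0 = 5
      · simp [h5, ih]
      · simp [h30, h5, ih]

-- first-occurrence dedup commutes with a pointwise filter
theorem pv_update_filter (q : String → Bool) (l : List String) (s : List String) :
    (PySem.Set.update s l).filter q = PySem.Set.update (s.filter q) (l.filter q) := by
  induction l generalizing s with
  | nil => simp [PySem.Set.update]
  | cons x t ih =>
    simp only [PySem.Set.update, List.foldl_cons, List.filter_cons] at *
    by_cases hq : q x = true
    · by_cases hc : x ∈ s
      · have e1 : PySem.Set.add s x = s := by simp [PySem.Set.add, hc]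
        have e2 : PySem.Set.add (List.filter q s) x = List.filter q s := by
          simp [PySem.Set.add, List.mem_filter, hc, hq]
        rw [e1, if_pos hq, List.foldl_cons, e2]
        exact ih s
      · have e1 : PySem.Set.add s x = s ++ [x] := by simp [PySem.Set.add, hc]
        have e2 : PySem.Set.add (List.filter q s) x = List.filter q s ++ [x] := by
          simp [PySem.Set.add, List.mem_filter, hc]
        rw [e1, if_pos hq, List.foldl_cons, e2]
        simpa [List.filter_append, hq] using ih (s ++ [x])
    · simp only [Bool.not_eq_true] at hq
      by_cases hc : x ∈ s
      · have e1 : PySem.Set.add s x = s := by simp [PySem.Set.add, hc]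
        rw [e1, if_neg (by simp [hq])]
        exact ih s
      · have e1 : PySem.Set.add s x = s ++ [x] := by simp [PySem.Set.add, hc]
        rw [e1, if_neg (by simp [hq])]
        simpa [List.filter_append, hq] using ih (s ++ [x])

theorem pv_ofList_filter (q : String → Bool) (l : List String) :
    (PySem.Set.ofList l).filter q = PySem.Set.ofList (l.filter q) := by
  simpa [PySem.Set.ofList, PySem.Set.empty] using pv_update_filter q l []

-- one side (good with n = 30, poor with n = 5): A's filtered grouping dict equals B's routed dict
theorem pv_side (pairs : List (String × String)) (n : Nat) :
    (((pairs.foldl (fun d p => d.modify p.2 [] (fun imgs => imgs ++ [p.1])) PySem.Dict.empty).keys.filter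
        (fun c => ((pairs.foldl (fun d p => d.modify p.2 [] (fun imgs => imgs ++ [p.1])) PySem.Dict.empty).getD c []).length == n)).map
      (fun c => (c, (pairs.foldl (fun d p => d.modify p.2 [] (fun imgs => imgs ++ [p.1])) PySem.Dict.empty).getD c []))) =
    ((pairs.filter (fun p => ((pairs.map (fun p => p.2)).foldl (fun d c => d.insert c (d.getD c 0 + 1)) PySem.Dict.empty).getD p.2 0 == (n : Int))).foldl
        (fun d p => d.modify p.2 [] (fun imgs => imgs ++ [p.1])) PySem.Dict.empty).items := by
  have hgetD : ∀ (l : List (String × String)) (c : String),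
      (l.foldl (fun d p => d.modify p.2 [] (fun imgs => imgs ++ [p.1])) PySem.Dict.empty).getD c []
        = (l.filter (fun p => p.2 == c)).map (fun p => p.1) := by
    intro l c
    rw [show (l.foldl (fun d p => d.modify p.2 [] (fun imgs => imgs ++ [p.1])) PySem.Dict.empty)
        = ((l.map (fun p => (p.2, p.1))).foldl (fun d p => d.modify p.1 [] (fun imgs => imgs ++ [p.2])) PySem.Dict.empty)
      from by rw [List.foldl_map]]
    rw [PySem.Dict.getD_foldl_modify_append]
    simp [List.filter_map, Function.comp_def]
  have hkeys : ∀ (l : List (String × String)),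
      (l.foldl (fun d p => d.modify p.2 [] (fun imgs => imgs ++ [p.1])) PySem.Dict.empty).keys
        = PySem.Set.ofList (l.map (fun p => p.2)) := by
    intro l
    rw [PySem.Dict.keys_foldl_modify_key l (fun p => p.2) [] (fun _ p => (fun imgs => imgs ++ [p.1]))]
    simp [PySem.Set.ofList, PySem.Set.update, PySem.Set.empty]
  have hnodup : ∀ (l : List (String × String)),
      (l.foldl (fun d p => d.modify p.2 [] (fun imgs => imgs ++ [p.1])) PySem.Dict.empty).keys.Nodup := by
    intro l
    exact PySem.Dict.nodup_keys_foldl_modify_key l (fun p => p.2) [] (fun _ p => (fun imgs => imgs ++ [p.1])) _ (by simp)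
  have hcnt : ∀ c : String,
      ((pairs.map (fun p => p.2)).foldl (fun d c => d.insert c (d.getD c 0 + 1)) PySem.Dict.empty).getD c 0
        = ((pairs.map (fun p => p.2)).count c : Int) := by
    intro c
    rw [PySem.Dict.getD_foldl_insert_add_one]
    simp
  -- boolean predicate bridge: A's length test equals B's count test
  have hpred : ∀ c : String,
      (((pairs.foldl (fun d p => d.modify p.2 [] (fun imgs => imgs ++ [p.1])) PySem.Dict.empty).getD c []).length == n)
        = (((pairs.map (fun p => p.2)).foldl (fun d c => d.insert c (d.getD c 0 + 1)) PySem.Dict.empty).getD c 0 == (n : Int)) := by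
    intro c
    rw [hgetD, hcnt]
    apply Bool.eq_iff_iff.mpr
    simp [List.count_eq_countP, List.countP_eq_length_filter, List.filter_map, Function.comp_def]
  -- the filtered pairs' image lists coincide with the full grouping where the test holds
  have hsame : ∀ c : String,
      (((pairs.map (fun p => p.2)).foldl (fun d c => d.insert c (d.getD c 0 + 1)) PySem.Dict.empty).getD c 0 == (n : Int)) = true →
      ((pairs.filter (fun p => ((pairs.map (fun p => p.2)).foldl (fun d c => d.insert c (d.getD c 0 + 1)) PySem.Dict.empty).getD p.2 0 == (n : Int))).filter
          (fun p => p.2 == c))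
        = pairs.filter (fun p => p.2 == c) := by
    intro c hc
    rw [List.filter_filter]
    apply List.filter_congr
    intro p _
    by_cases hpc : p.2 = c
    · simp [hpc, hc]
    · simp [hpc]
  -- RHS as a map over its keys
  rw [PySem.Dict.items_eq_map_keys _ (hnodup _) []]
  rw [hkeys]
  have hmapfilter :
      (pairs.filter (fun p => ((pairs.map (fun p => p.2)).foldl (fun d c => d.insert c (d.getD c 0 + 1)) PySem.Dict.empty).getD p.2 0 == (n : Int))).map (fun p => p.2)
        = (pairs.map (fun p => p.2)).filter (fun c => ((pairs.map (fun p => p.2)).foldl (fun d c => d.insert c (d.getD c 0 + 1)) PySem.Dict.empty).getD c 0 == (n : Int)) := by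
    rw [List.filter_map]
    simp [Function.comp_def]
  rw [hkeys, hmapfilter, ← pv_ofList_filter]
  -- LHS filter predicate becomes B's predicate
  have hfeq : ((PySem.Set.ofList (pairs.map (fun p => p.2))).filter
        (fun c => ((pairs.foldl (fun d p => d.modify p.2 [] (fun imgs => imgs ++ [p.1])) PySem.Dict.empty).getD c []).length == n))
      = ((PySem.Set.ofList (pairs.map (fun p => p.2))).filter
        (fun c => ((pairs.map (fun p => p.2)).foldl (fun d c => d.insert c (d.getD c 0 + 1)) PySem.Dict.empty).getD c 0 == (n : Int))) := by
    apply List.filter_congr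
    intro c _
    exact hpred c
  rw [hfeq]
  apply List.map_congr_left
  intro c hcmem
  have hc : (((pairs.map (fun p => p.2)).foldl (fun d c => d.insert c (d.getD c 0 + 1)) PySem.Dict.empty).getD c 0 == (n : Int)) = true :=
    (List.mem_filter.mp hcmem).2
  rw [hgetD, hgetD, hsame c hc]

-- ===== VERDICT (by name: the statement is the Claim_ definition above) =====
theorem get_celebrities_and_images_spec : Claim_equal_get_celebrities_and_images := by
  intro identities _
  unfold Spec_get_celebrities_and_images
  simp only [get_celebrities_and_images, get_celebrities_and_images_alt]
  rw [pv_foldA, pv_foldB1, pv_foldB2]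
  refine Prod.ext ?_ ?_
  · simpa using (pv_side (pvPairs identities) 30)
  · simpa using (pv_side (pvPairs identities) 5)
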